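-- pv_equiv track=rewrite | github.com/tiagotmartinez/lzss | python/lzss.py | _link_matches
-- ===== SOURCE A (Python) =====
-- def _link_matches(data):
--     offsets = [0] * len(data)
--     prev = [-1] * (256 * 256)
--     for i in range(len(data) - 1):
--         h = data[i] * 256 + data[i + 1]
--         offsets[i] = i - prev[h] if prev[h] >= 0 else 0
--         prev[h] = i
--     return offsets
-- ===== SOURCE B (Python) =====
-- def _link_matches(data):
--     # Group positions by 2-byte pair value, then emit consecutive gaps per bucket.
--     buckets = {}
--     for i in range(len(data) - 1):
--         buckets.setdefault(data[i] * 256 + data[i + 1], []).append(i)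
--     offsets = [0] * len(data)
--     for positions in buckets.values():
--         for prev, cur in zip(positions, positions[1:]):
--             offsets[cur] = cur - prev
--     return offsets
-- ===== Notes on version B (the rewrite author's own statement) =====
-- stated objective: alternative
-- what changed: Replaces the single scan over a preallocated 65536-entry prev table with a two-phase grouping: first bucket the positions of each 2-byte pair value in a dict of lists, then write each bucket's consecutive position gaps into the offsets array.
-- outside the precondition, e.g. on _link_matches([255, 255, 0, -1]): A returns [0, 0, 2, 0], B returns [0, 0, 0, 0]; on _link_matches([300, 300]): A raises IndexError, B returns [0, 0]
import Mathlib
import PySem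

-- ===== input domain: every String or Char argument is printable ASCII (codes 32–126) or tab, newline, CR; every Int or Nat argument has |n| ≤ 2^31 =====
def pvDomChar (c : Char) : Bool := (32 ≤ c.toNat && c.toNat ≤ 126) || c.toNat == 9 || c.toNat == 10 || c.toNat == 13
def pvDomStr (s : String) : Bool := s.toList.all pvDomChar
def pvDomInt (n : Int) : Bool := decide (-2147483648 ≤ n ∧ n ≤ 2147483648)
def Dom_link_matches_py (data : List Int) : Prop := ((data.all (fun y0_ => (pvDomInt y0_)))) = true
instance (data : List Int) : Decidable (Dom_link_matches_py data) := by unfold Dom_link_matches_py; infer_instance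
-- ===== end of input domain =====

-- B replaces A's single scan over a preallocated 65536-entry prev table by a two-phase grouping
-- (bucket the positions of each 2-byte pair value, then write each bucket's consecutive gaps):
-- an alternative decomposition of the same O(n) task, not claimed faster.


-- ===== PORT A =====
def linkAStep (data : List Int) (st : Option (List Int × List Int)) (i : Int) :
    Option (List Int × List Int) :=
  match st with
  | none => none
  | some (offsets, prev) =>
    -- h = data[i] * 256 + data[i + 1]; i and i + 1 are in range for every i the loop visits
    let h : Int := PySem.List.pyGetD data i 0 * 256 + PySem.List.pyGetD data (i + 1) 0
    match PySem.List.pyGet? prev h with        -- prev[h]: none is exactly Python's IndexError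
    | none => none
    | some ph =>
      let offsets' := PySem.List.pySetD offsets i (if 0 ≤ ph then i - ph else 0)
      match PySem.List.pySet? prev h i with    -- prev[h] = i
      | none => none
      | some prev' => some (offsets', prev')

def link_matches_py (data : List Int) : List Int :=
  match (PySem.List.pyRange 0 ((data.length : Int) - 1) 1).foldl (linkAStep data)
      (some (List.replicate data.length 0, List.replicate (256 * 256) (-1))) with
  | some (offsets, _) => offsets
  | none => []   -- reached only where the Python raises IndexError (excluded by Pre_)

-- ===== PORT B =====
def linkBStep (offsets : List Int) (pc : Int × Int) : List Int :=
  PySem.List.pySetD offsets pc.2 (pc.2 - pc.1)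

def link_matches_py_alt (data : List Int) : List Int :=
  let buckets : PySem.Dict Int (List Int) :=
    (PySem.List.pyRange 0 ((data.length : Int) - 1) 1).foldl
      (fun d i =>
        PySem.Dict.modify d (PySem.List.pyGetD data i 0 * 256 + PySem.List.pyGetD data (i + 1) 0)
          [] (fun l => l ++ [i]))
      PySem.Dict.empty
  (PySem.Dict.values buckets).foldl
    (fun offsets ps => (ps.zip (PySem.List.slice ps (some 1) none)).foldl linkBStep offsets)
    (List.replicate data.length 0)

-- ===== PRECONDITION & SPEC =====
-- Pre_ excludes inputs where some adjacent pair value data[i]*256+data[i+1] falls outside [0, 65536):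
-- there A either raises IndexError (pair value outside [-65536, 65536)) or, through Python's
-- negative-index wraparound of the fixed-size table, silently aliases that pair with the pair value
-- 65536 higher — an artefact of A's table implementation, while B keys buckets by the exact value.
def Pre_link_matches_py (data : List Int) : Prop :=
  ∀ p ∈ data.zip data.tail, 0 ≤ p.1 * 256 + p.2 ∧ p.1 * 256 + p.2 < 65536
instance (data : List Int) : Decidable (Pre_link_matches_py data) := by
  unfold Pre_link_matches_py; infer_instance

def pvWitness_link_matches_py : List Int := [65, 66, 65, 66, 10]

def Spec_link_matches_py (data : List Int) (out : List Int) : Prop := out = link_matches_py_alt data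
instance (data : List Int) (out : List Int) : Decidable (Spec_link_matches_py data out) := by
  unfold Spec_link_matches_py; infer_instance

-- ===== CLAIM (what is proved, stated in full; the proofs are below) =====
def Claim_equal_link_matches_py : Prop := ∀ (data : List Int), Dom_link_matches_py data → Pre_link_matches_py data → Spec_link_matches_py data (link_matches_py data)



-- ===== LEMMAS AND PROOFS =====

-- the 2-byte pair value at position j
def hAt (data : List Int) (j : Nat) : Int := data.getD j 0 * 256 + data.getD (j + 1) 0

-- largest j < i whose pair value is h (as an Int), else -1
def lastLt (data : List Int) (h : Int) (i : Nat) : Int :=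
  (List.range i).foldl (fun acc j => if hAt data j = h then (j : Int) else acc) (-1)

-- the common specification value at position i
def specAt (data : List Int) (i : Nat) : Int :=
  if 0 ≤ lastLt data (hAt data i) i then (i : Int) - lastLt data (hAt data i) i else 0

def offTarget (data : List Int) : List Int :=
  (List.range data.length).map (fun i => if i + 1 < data.length then specAt data i else 0)

theorem rangeIntCast (n : Nat) :
    PySem.List.pyRange 0 ((n : Int) - 1) 1 = (List.range (n - 1)).map (fun k : Nat => (k : Int)) := by
  have h : (((n : Int) - 1) - 0).toNat = n - 1 := by omega
  rw [PySem.List.pyRange_one, h]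
  exact List.map_congr_left (fun k _ => by omega)

theorem hAt_cast (data : List Int) (j : Nat) :
    PySem.List.pyGetD data (j : Int) 0 * 256 + PySem.List.pyGetD data ((j : Int) + 1) 0 =
      hAt data j := by
  have h1 : ((j : Int) + 1) = ((j + 1 : Nat) : Int) := by push_cast; ring
  rw [h1, PySem.List.pyGetD_natCast, PySem.List.pyGetD_natCast, hAt]

theorem lastLt_succ (data : List Int) (h : Int) (m : Nat) :
    lastLt data h (m + 1) = if hAt data m = h then (m : Int) else lastLt data h m := by
  rw [lastLt, lastLt, List.range_succ, List.foldl_append, List.foldl_cons, List.foldl_nil]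

theorem Pre_hAt (data : List Int) (hPre : Pre_link_matches_py data) (j : Nat)
    (hj : j + 1 < data.length) : 0 ≤ hAt data j ∧ hAt data j < 65536 := by
  have hj0 : j < data.length := by omega
  have hjz : j < (data.zip data.tail).length := by
    rw [List.length_zip, List.length_tail]; omega
  have hmem : (data[j], data[j + 1]) ∈ data.zip data.tail := by
    have hget : (data.zip data.tail)[j] = (data[j]'hj0, data[j + 1]'hj) := by
      rw [List.getElem_zip]
      congr 1
      exact List.getElem_tail _
    rw [← hget]
    exact List.getElem_mem hjz
  have h2 := hPre _ hmem
  rw [hAt, List.getD_eq_getElem _ 0 hj0, List.getD_eq_getElem _ 0 hj]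
  exact h2

-- ===== the A side =====

def offA (data : List Int) (m : Nat) : List Int :=
  (List.range data.length).map (fun i => if i < m then specAt data i else 0)

def prevA (data : List Int) (m : Nat) : List Int :=
  (List.range (256 * 256)).map (fun h : Nat => lastLt data (h : Int) m)

theorem offA_zero (data : List Int) : offA data 0 = List.replicate data.length 0 := by
  apply List.ext_getElem
  · rw [offA, List.length_map, List.length_range, List.length_replicate]
  · intro i hi1 hi2
    simp only [offA, List.getElem_map, List.getElem_range, List.getElem_replicate]
    rw [if_neg (by omega)]

theorem prevA_zero (data : List Int) : prevA data 0 = List.replicate (256 * 256) (-1) := by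
  apply List.ext_getElem
  · rw [prevA, List.length_map, List.length_range, List.length_replicate]
  · intro i hi1 hi2
    simp only [prevA, List.getElem_map, List.getElem_range, List.getElem_replicate]
    rfl

theorem length_prevA (data : List Int) (m : Nat) : (prevA data m).length = 256 * 256 := by
  rw [prevA, List.length_map, List.length_range]

theorem offA_set (data : List Int) (m : Nat) (_hm : m < data.length) :
    (offA data m).set m (specAt data m) = offA data (m + 1) := by
  apply List.ext_getElem
  · rw [List.length_set, offA, offA, List.length_map, List.length_map]
  · intro i hi1 hi2
    rw [List.getElem_set]
    by_cases hmi : m = i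
    · subst hmi
      rw [if_pos rfl]
      simp only [offA, List.getElem_map, List.getElem_range]
      rw [if_pos (by omega)]
    · rw [if_neg hmi]
      simp only [offA, List.getElem_map, List.getElem_range]
      by_cases him : i < m
      · rw [if_pos him, if_pos (by omega)]
      · rw [if_neg him, if_neg (by
          have : i ≠ m := fun hh => hmi hh.symm
          omega)]

theorem prevA_set (data : List Int) (m : Nat) (hb : 0 ≤ hAt data m ∧ hAt data m < 65536) :
    (prevA data m).set (hAt data m).toNat (m : Int) = prevA data (m + 1) := by
  apply List.ext_getElem
  · rw [List.length_set, prevA, prevA, List.length_map, List.length_map]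
  · intro k hk1 hk2
    have hk : k < 256 * 256 := by
      rw [List.length_set, length_prevA] at hk1
      exact hk1
    rw [List.getElem_set]
    simp only [prevA, List.getElem_map, List.getElem_range]
    rw [lastLt_succ]
    by_cases hek : (hAt data m).toNat = k
    · rw [if_pos hek, if_pos (by omega : hAt data m = (k : Int))]
    · rw [if_neg hek, if_neg (by omega : ¬ hAt data m = (k : Int))]

set_option maxRecDepth 16384 in
theorem Aloop (data : List Int) (hPre : Pre_link_matches_py data) :
    ∀ m, m + 1 ≤ data.length →
      ((List.range m).map (fun k : Nat => (k : Int))).foldl (linkAStep data)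
          (some (List.replicate data.length 0, List.replicate (256 * 256) (-1))) =
        some (offA data m, prevA data m) := by
  intro m
  induction m with
  | zero =>
    intro _
    simp only [List.range_zero, List.map_nil, List.foldl_nil, offA_zero, prevA_zero]
  | succ m ih =>
    intro hm1
    have hm : m + 1 < data.length := by omega
    rw [List.range_succ, List.map_append, List.foldl_append, ih (by omega),
      List.map_cons, List.map_nil, List.foldl_cons, List.foldl_nil]
    have hb := Pre_hAt data hPre m hm
    show linkAStep data (some (offA data m, prevA data m)) (m : Int) = _
    simp only [linkAStep, hAt_cast]
    have hget : PySem.List.pyGet? (prevA data m) (hAt data m) =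
        some (lastLt data (hAt data m) m) := by
      have hlt : hAt data m < ((prevA data m).length : Int) := by
        rw [length_prevA]; omega
      rw [PySem.List.pyGet?_eq_some_getElem _ hb.1 hlt]
      simp only [prevA, List.getElem_map, List.getElem_range, Int.toNat_of_nonneg hb.1]
    rw [hget]
    have hset : PySem.List.pySet? (prevA data m) (hAt data m) (m : Int) =
        some ((prevA data m).set (hAt data m).toNat (m : Int)) := by
      rw [← Int.toNat_of_nonneg hb.1]
      rw [Int.toNat_of_nonneg hb.1]
      rw [show (hAt data m) = ((hAt data m).toNat : Int) from (Int.toNat_of_nonneg hb.1).symm]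
      exact PySem.List.pySet?_natCast _ _ _ (by rw [length_prevA]; omega)
    rw [hset]
    show some (PySem.List.pySetD (offA data m) ((m : Nat) : Int)
        (if 0 ≤ lastLt data (hAt data m) m then ((m : Nat) : Int) - lastLt data (hAt data m) m else 0),
      (prevA data m).set (hAt data m).toNat ((m : Nat) : Int)) = _
    have hoff : PySem.List.pySetD (offA data m) (m : Int)
        (if 0 ≤ lastLt data (hAt data m) m then (m : Int) - lastLt data (hAt data m) m else 0) =
        offA data (m + 1) := by
      rw [PySem.List.pySetD_natCast]
      rw [show (if 0 ≤ lastLt data (hAt data m) m then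
          (m : Int) - lastLt data (hAt data m) m else 0) = specAt data m from rfl]
      exact offA_set data m (by omega)
    rw [hoff, prevA_set data m hb]

theorem offA_last (data : List Int) : offA data (data.length - 1) = offTarget data := by
  rw [offA, offTarget]
  apply List.map_congr_left
  intro i hi
  have hin : i < data.length := List.mem_range.mp hi
  by_cases h1 : i < data.length - 1
  · rw [if_pos h1, if_pos (by omega)]
  · rw [if_neg h1, if_neg (by omega)]

theorem linkA_eq_target (data : List Int) (hPre : Pre_link_matches_py data) :
    link_matches_py data = offTarget data := by
  rw [link_matches_py, rangeIntCast data.length]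
  rcases Nat.eq_zero_or_pos data.length with h0 | hpos
  · have hd : data = [] := List.length_eq_zero_iff.mp h0
    subst hd
    rfl
  · rw [Aloop data hPre (data.length - 1) (by omega), offA_last]

-- ===== the B side =====

def zp {α : Type} (L : List α) : List (α × α) := L.zip L.tail

theorem tail_map' {α β : Type} (f : α → β) (l : List α) : (l.map f).tail = l.tail.map f := by
  cases l <;> simp

theorem zp_map {α β : Type} (f : α → β) (l : List α) :
    zp (l.map f) = (zp l).map (Prod.map f f) := by
  rw [zp, zp, tail_map', List.zip_map]

theorem zp_append_singleton {α : Type} (L : List α) (x : α) :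
    zp (L ++ [x]) = zp L ++ (L.getLast?.elim [] (fun a => [(a, x)])) := by
  induction L with
  | nil => simp [zp]
  | cons y L ih =>
    cases L with
    | nil => simp [zp]
    | cons z L' =>
      have h1 : zp (y :: (z :: L' ++ [x])) = (y, z) :: zp (z :: L' ++ [x]) := rfl
      have h2 : zp (y :: z :: L') = (y, z) :: zp (z :: L') := rfl
      rw [List.cons_append, h1, ih, h2, List.getLast?_cons_cons, List.cons_append]

def flt (data : List Int) (h : Int) (m : Nat) : List Nat :=
  (List.range m).filter (fun j => decide (hAt data j = h))

def posL (data : List Int) (h : Int) (m : Nat) : List Int :=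
  (flt data h m).map (fun j : Nat => (j : Int))

theorem foldl_pick_last (l : List Nat) (a : Int) :
    l.foldl (fun (_ : Int) (j : Nat) => (j : Int)) a = l.getLast?.elim a (fun x => (x : Int)) := by
  induction l generalizing a with
  | nil => rfl
  | cons y l ih =>
    rw [List.foldl_cons, ih]
    cases l with
    | nil => rfl
    | cons z l' => rw [List.getLast?_cons_cons]; rfl

theorem lastLt_eq_getLast? (data : List Int) (h : Int) (m : Nat) :
    lastLt data h m = (flt data h m).getLast?.elim (-1) (fun a => (a : Int)) := by
  rw [lastLt, PySem.List.foldl_ite_eq_foldl_filter (p := fun j => hAt data j = h)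
    (f := fun (_ : Int) (j : Nat) => (j : Int)), ← flt, foldl_pick_last]

theorem flt_succ (data : List Int) (h : Int) (m : Nat) :
    flt data h (m + 1) = flt data h m ++ (if hAt data m = h then [m] else []) := by
  rw [flt, flt, List.range_succ, List.filter_append]
  congr 1
  rw [List.filter_singleton]
  by_cases hc : hAt data m = h
  · rw [if_pos hc]
    simp [hc]
  · rw [if_neg hc]
    simp [hc]

theorem mem_zp_flt (data : List Int) (h : Int) :
    ∀ m (a b : Nat), ((a, b) ∈ zp (flt data h m)) ↔
      (b < m ∧ hAt data b = h ∧ lastLt data h b = (a : Int)) := by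
  intro m
  induction m with
  | zero => intro a b; simp [flt, zp]
  | succ m ih =>
    intro a b
    rw [flt_succ]
    by_cases hc : hAt data m = h
    · rw [if_pos hc, zp_append_singleton, List.mem_append]
      constructor
      · rintro (h1 | h2)
        · have := (ih a b).mp h1
          exact ⟨by omega, this.2.1, this.2.2⟩
        · cases hlast : (flt data h m).getLast? with
          | none => rw [hlast] at h2; simp at h2
          | some a' =>
            rw [hlast] at h2
            simp only [Option.elim, List.mem_singleton, Prod.mk.injEq] at h2
            obtain ⟨rfl, rfl⟩ := h2
            refine ⟨by omega, hc, ?_⟩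
            rw [lastLt_eq_getLast?, hlast]
            rfl
      · rintro ⟨hb, hhb, hl⟩
        by_cases hbm : b < m
        · exact Or.inl ((ih a b).mpr ⟨hbm, hhb, hl⟩)
        · have hbm' : b = m := by omega
          subst hbm'
          right
          rw [lastLt_eq_getLast?] at hl
          cases hlast : (flt data h b).getLast? with
          | none =>
            rw [hlast] at hl
            simp only [Option.elim] at hl
            omega
          | some a' =>
            rw [hlast] at hl
            simp only [Option.elim] at hl
            have haa : a' = a := by omega
            subst haa
            simp
    · rw [if_neg hc]
      rw [List.append_nil, ih]
      constructor
      · rintro ⟨hb, hhb, hl⟩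
        exact ⟨by omega, hhb, hl⟩
      · rintro ⟨hb, hhb, hl⟩
        have hne : b ≠ m := by rintro rfl; exact hc hhb
        exact ⟨by omega, hhb, hl⟩

def bDict (data : List Int) : PySem.Dict Int (List Int) :=
  ((List.range (data.length - 1)).map (fun j : Nat => ((hAt data j : Int), (j : Int)))).foldl
    (fun d p => d.modify p.1 [] (fun l => l ++ [p.2])) PySem.Dict.empty

theorem buckets_eq (data : List Int) :
    (PySem.List.pyRange 0 ((data.length : Int) - 1) 1).foldl
        (fun d i =>
          PySem.Dict.modify d
            (PySem.List.pyGetD data i 0 * 256 + PySem.List.pyGetD data (i + 1) 0)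
            [] (fun l => l ++ [i]))
        PySem.Dict.empty = bDict data := by
  rw [rangeIntCast, List.foldl_map, bDict, List.foldl_map]
  apply PySem.List.foldl_congr_mem
  intro d j _
  show PySem.Dict.modify d _ [] _ = PySem.Dict.modify d _ [] _
  rw [hAt_cast]

theorem bDict_getD (data : List Int) (h : Int) :
    (bDict data).getD h [] = posL data h (data.length - 1) := by
  rw [bDict, PySem.Dict.getD_foldl_modify_append, PySem.Dict.getD_empty, List.nil_append]
  rw [List.filter_map, List.map_map, posL, flt]
  have hp : ((fun p : Int × Int => p.1 == h) ∘ (fun j : Nat => ((hAt data j : Int), (j : Int)))) =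
      fun j : Nat => decide (hAt data j = h) := by
    funext j
    by_cases hq : hAt data j = h <;> simp [hq]
  rw [hp]
  rfl

theorem nodup_keys_bDict (data : List Int) : (bDict data).keys.Nodup := by
  rw [bDict]
  generalize (List.range (data.length - 1)).map (fun j : Nat => ((hAt data j : Int), (j : Int))) = l
  have key : ∀ (l : List (Int × Int)) (d : PySem.Dict Int (List Int)),
      d.keys.Nodup →
      (l.foldl (fun d p => d.modify p.1 [] (fun v => v ++ [p.2])) d).keys.Nodup := by
    intro l
    induction l with
    | nil => intro d hd; exact hd
    | cons p l ih =>
      intro d hd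
      rw [List.foldl_cons]
      apply ih
      rw [PySem.Dict.keys_modify]
      exact PySem.Dict.nodup_keys_insert _ _ _ hd
  exact key l PySem.Dict.empty PySem.Dict.nodup_keys_empty

theorem mem_values_iff (d : PySem.Dict Int (List Int)) (hnd : d.keys.Nodup) (v : List Int) :
    v ∈ d.values ↔ ∃ k, d.get? k = some v := by
  cases d with
  | mk l =>
    rw [PySem.Dict.values_mk, List.mem_map]
    constructor
    · rintro ⟨p, hp, rfl⟩
      exact ⟨p.1, (PySem.Dict.get?_eq_some_iff_mem_items _ _ _ hnd).mpr hp⟩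
    · rintro ⟨k, hk⟩
      exact ⟨(k, v), PySem.Dict.mem_items_of_get?_eq_some _ hk, rfl⟩

def canon (data : List Int) (b : Nat) : Int × Int := (lastLt data (hAt data b) b, (b : Int))

theorem mem_U_iff (data : List Int) (pc : Int × Int) :
    pc ∈ ((bDict data).values.flatMap zp) ↔
      ∃ b : Nat, b + 1 < data.length ∧ 0 ≤ lastLt data (hAt data b) b ∧ pc = canon data b := by
  rw [List.mem_flatMap]
  constructor
  · rintro ⟨ps, hps, hpc⟩
    obtain ⟨k, hk⟩ := (mem_values_iff _ (nodup_keys_bDict data) ps).mp hps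
    have hps' : ps = posL data k (data.length - 1) := by
      have hg := bDict_getD data k
      rw [PySem.Dict.getD_eq_get?_getD, hk] at hg
      simpa using hg
    subst hps'
    rw [posL, zp_map, List.mem_map] at hpc
    obtain ⟨⟨a, b⟩, hab, rfl⟩ := hpc
    obtain ⟨hb, hhb, hl⟩ := (mem_zp_flt data k _ a b).mp hab
    refine ⟨b, by omega, ?_, ?_⟩
    · rw [hhb, hl]
      exact Int.natCast_nonneg a
    · simp [canon, Prod.map, hhb, hl]
  · rintro ⟨b, hb, hpos, rfl⟩
    refine ⟨posL data (hAt data b) (data.length - 1), ?_, ?_⟩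
    · apply (mem_values_iff _ (nodup_keys_bDict data) _).mpr
      have hg := bDict_getD data (hAt data b)
      have hbm : b ∈ flt data (hAt data b) (data.length - 1) := by
        rw [flt, List.mem_filter]
        exact ⟨List.mem_range.mpr (by omega), by simp⟩
      have hne : posL data (hAt data b) (data.length - 1) ≠ [] := by
        apply List.ne_nil_of_mem (a := ((b : Nat) : Int))
        rw [posL]
        exact List.mem_map_of_mem hbm
      cases hq : (bDict data).get? (hAt data b) with
      | none =>
        rw [PySem.Dict.getD_eq_get?_getD, hq] at hg
        simp only [Option.getD_none] at hg
        exact absurd hg.symm hne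
      | some v =>
        rw [PySem.Dict.getD_eq_get?_getD, hq] at hg
        simp only [Option.getD_some] at hg
        exact ⟨hAt data b, by rw [hq, hg]⟩
    · rw [posL, zp_map, List.mem_map]
      refine ⟨((lastLt data (hAt data b) b).toNat, b), ?_, ?_⟩
      · apply (mem_zp_flt data (hAt data b) _ _ b).mpr
        exact ⟨by omega, rfl, by rw [Int.toNat_of_nonneg hpos]⟩
      · simp [canon, Prod.map, Int.toNat_of_nonneg hpos]

theorem length_foldl_BStep (U : List (Int × Int)) (init : List Int) :
    (U.foldl linkBStep init).length = init.length := by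
  induction U generalizing init with
  | nil => rfl
  | cons pc U ih =>
    rw [List.foldl_cons, ih, linkBStep, PySem.List.length_pySetD]

theorem read_foldl (U : List (Int × Int)) (init : List Int) (i : Nat)
    (hbd : ∀ pc ∈ U, 0 ≤ pc.2 ∧ pc.2 < (init.length : Int)) :
    (U.foldl linkBStep init).getD i 0 =
      ((U.filter (fun pc => pc.2 == (i : Int))).getLast?).elim (init.getD i 0)
        (fun pc => pc.2 - pc.1) := by
  induction U using List.reverseRecOn with
  | nil => simp
  | append_singleton U pc ih =>
    have hpc := hbd pc (by simp)
    have hU : ∀ q ∈ U, 0 ≤ q.2 ∧ q.2 < (init.length : Int) := fun q hq => hbd q (by simp [hq])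
    rw [List.foldl_append, List.foldl_cons, List.foldl_nil]
    have hF : (U.foldl linkBStep init).length = init.length := length_foldl_BStep U init
    rw [linkBStep, PySem.List.pySetD_of_nonneg _ _ hpc.1]
    rw [List.filter_append, List.filter_singleton]
    by_cases hci : pc.2.toNat = i
    · have htrue : (pc.2 == (i : Int)) = true := by
        simp only [beq_iff_eq]
        omega
      rw [htrue]
      simp only [cond_true]
      rw [List.getLast?_append, List.getLast?_singleton, Option.some_or]
      simp only [Option.elim]
      rw [List.getD_eq_getElem?_getD, List.getElem?_set, if_pos hci,
        if_pos (by omega : pc.2.toNat < (U.foldl linkBStep init).length)]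
      rfl
    · have hfalse : (pc.2 == (i : Int)) = false := by
        simp only [beq_eq_false_iff_ne, ne_eq]
        omega
      rw [hfalse]
      simp only [cond_false, List.append_nil]
      rw [← ih hU, List.getD_eq_getElem?_getD, List.getElem?_set,
        if_neg hci, ← List.getD_eq_getElem?_getD]

theorem B_unfold (data : List Int) :
    link_matches_py_alt data =
      ((bDict data).values.flatMap zp).foldl linkBStep (List.replicate data.length 0) := by
  rw [link_matches_py_alt]
  rw [buckets_eq]
  rw [List.foldl_flatMap]
  apply PySem.List.foldl_congr_mem
  intro off ps _
  rw [PySem.List.slice_from_one, ← zp]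

theorem linkB_eq_target (data : List Int) :
    link_matches_py_alt data = offTarget data := by
  rw [B_unfold]
  have hbd : ∀ pc ∈ (bDict data).values.flatMap zp,
      0 ≤ pc.2 ∧ pc.2 < ((List.replicate data.length (0 : Int)).length : Int) := by
    intro pc hpc
    obtain ⟨b, hb, _, rfl⟩ := (mem_U_iff data pc).mp hpc
    rw [List.length_replicate]
    simp only [canon]
    exact ⟨Int.natCast_nonneg b, by exact_mod_cast (by omega : b < data.length)⟩
  apply List.ext_getElem
  · rw [length_foldl_BStep, List.length_replicate, offTarget, List.length_map, List.length_range]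
  · intro i hi1 hi2
    have hin : i < data.length := by
      rw [offTarget, List.length_map, List.length_range] at hi2
      exact hi2
    rw [← List.getD_eq_getElem _ 0 hi1, ← List.getD_eq_getElem _ 0 hi2]
    rw [read_foldl _ _ i hbd]
    have hlen : i < ((List.range data.length).map
        (fun i => if i + 1 < data.length then specAt data i else 0)).length := by
      rw [List.length_map, List.length_range]
      exact hin
    have htgt : (offTarget data).getD i 0 =
        if i + 1 < data.length then specAt data i else 0 := by
      rw [offTarget, List.getD_eq_getElem _ 0 hlen, List.getElem_map, List.getElem_range]
    rw [htgt]
    have hall : ∀ pc ∈ ((bDict data).values.flatMap zp).filter (fun pc => pc.2 == (i : Int)),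
        pc = canon data i ∧ i + 1 < data.length ∧ 0 ≤ lastLt data (hAt data i) i := by
      intro pc hpc
      rw [List.mem_filter] at hpc
      obtain ⟨b, hb1, hb2, rfl⟩ := (mem_U_iff data pc).mp hpc.1
      have hcast : (b : Int) = (i : Int) := by
        have h3 := hpc.2
        rwa [canon, beq_iff_eq] at h3
      have hbi : b = i := by exact_mod_cast hcast
      subst hbi
      exact ⟨rfl, hb1, hb2⟩
    by_cases hcond : i + 1 < data.length ∧ 0 ≤ lastLt data (hAt data i) i
    · have hmem : canon data i ∈
          ((bDict data).values.flatMap zp).filter (fun pc => pc.2 == (i : Int)) := by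
        rw [List.mem_filter]
        exact ⟨(mem_U_iff data _).mpr ⟨i, hcond.1, hcond.2, rfl⟩, by simp [canon]⟩
      cases hlast : (((bDict data).values.flatMap zp).filter
          (fun pc => pc.2 == (i : Int))).getLast? with
      | none =>
        rw [List.getLast?_eq_none_iff] at hlast
        rw [hlast] at hmem
        simp at hmem
      | some pc =>
        have hpcm : pc ∈ ((bDict data).values.flatMap zp).filter
            (fun pc => pc.2 == (i : Int)) := List.mem_of_getLast? hlast
        have hpce := (hall pc hpcm).1
        subst hpce
        simp only [Option.elim, canon]
        rw [if_pos hcond.1, specAt, if_pos hcond.2]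
    · have hnil : ((bDict data).values.flatMap zp).filter (fun pc => pc.2 == (i : Int)) = [] := by
        rw [List.eq_nil_iff_forall_not_mem]
        intro pc hpc
        exact hcond ⟨(hall pc hpc).2.1, (hall pc hpc).2.2⟩
      rw [hnil]
      simp only [List.getLast?_nil, Option.elim]
      rw [List.getD_eq_getElem _ 0 (by rw [List.length_replicate]; exact hin),
        List.getElem_replicate]
      by_cases h1 : i + 1 < data.length
      · rw [if_pos h1, specAt, if_neg (by
          intro hcon
          exact hcond ⟨h1, hcon⟩)]
      · rw [if_neg h1]

-- ===== VERDICT (by name: the statement is the Claim_ definition above) =====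
theorem link_matches_py_spec : Claim_equal_link_matches_py := by
  intro data _ hPre
  unfold Spec_link_matches_py
  rw [linkA_eq_target data hPre, linkB_eq_target data]
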